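-- pv_equiv track=rewrite | github.com/insult0o/torematrix_labs2 | src/torematrix/ui/components/editors/markdown.py | _render_blockquotes
-- ===== SOURCE A (Python) =====
-- def _render_blockquotes(text: str) -> str:
--     """Render blockquotes"""
--     lines = text.split('\n')
--     result_lines = []
--     in_blockquote = False
--     quote_lines = []
--
--     for line in lines:
--         if line.startswith('>'):
--             if not in_blockquote:
--                 in_blockquote = True
--                 quote_lines = []
--             quote_lines.append(line[1:].strip())
--         else:
--             if in_blockquote:
--                 quote_html = '<br>'.join(quote_lines)
--                 result_lines.append(f'<blockquote>{quote_html}</blockquote>')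
--                 in_blockquote = False
--             result_lines.append(line)
--
--     # Handle final blockquote
--     if in_blockquote:
--         quote_html = '<br>'.join(quote_lines)
--         result_lines.append(f'<blockquote>{quote_html}</blockquote>')
--
--     return '\n'.join(result_lines)
-- ===== SOURCE B (Python) =====
-- def _render_blockquotes(text: str) -> str:
--     """Render blockquotes by chunking contiguous '>'-runs instead of a state flag."""
--     lines = text.split('\n')
--     out = []
--     i = 0
--     n = len(lines)
--     while i < n:
--         if lines[i].startswith('>'):
--             j = i
--             while j < n and lines[j].startswith('>'):
--                 j += 1
--             out.append('<blockquote>' + '<br>'.join(l[1:].strip() for l in lines[i:j]) + '</blockquote>')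
--             i = j
--         else:
--             out.append(lines[i])
--             i += 1
--     return '\n'.join(out)
-- ===== Notes on version B (the rewrite author's own statement) =====
-- stated objective: idiomatic
-- what changed: Replaced the in_blockquote flag / duplicated final-flush logic with a single chunking pass that groups each contiguous run of '>'-lines and renders it in one step.
import Mathlib
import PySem

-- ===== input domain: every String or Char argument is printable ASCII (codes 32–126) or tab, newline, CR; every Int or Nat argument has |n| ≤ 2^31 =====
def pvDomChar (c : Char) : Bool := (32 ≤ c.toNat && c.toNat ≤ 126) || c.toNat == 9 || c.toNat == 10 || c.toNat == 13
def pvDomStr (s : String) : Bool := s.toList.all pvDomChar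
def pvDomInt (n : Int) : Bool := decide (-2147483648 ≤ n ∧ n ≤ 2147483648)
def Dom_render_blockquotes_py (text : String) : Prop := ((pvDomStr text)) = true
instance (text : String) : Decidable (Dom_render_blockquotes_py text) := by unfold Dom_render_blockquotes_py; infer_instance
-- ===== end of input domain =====

-- B replaces A's in_blockquote state flag (and its duplicated final flush) by chunking
-- each contiguous run of '>'-lines and rendering the run in one step (idiomatic rewrite).

-- shared tiny helpers (both Pythons contain these same expressions verbatim)
def pvIsQuote (l : String) : Bool := PySem.Str.startswith l ">"
def pvQuoteBody (l : String) : String := PySem.Str.strip (PySem.Str.slice l (some 1) none)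
def pvBlockquote (q : List String) : String :=
  "<blockquote>" ++ PySem.Str.join "<br>" q ++ "</blockquote>"

-- ===== PORT A =====
-- state: (result_lines, in_blockquote, quote_lines)
def pvStepA (st : List String × Bool × List String) (line : String) :
    List String × Bool × List String :=
  if pvIsQuote line then
    (st.1, true, (if st.2.1 then st.2.2 else []) ++ [pvQuoteBody line])
  else
    if st.2.1 then (st.1 ++ [pvBlockquote st.2.2, line], false, st.2.2)
    else (st.1 ++ [line], false, st.2.2)

def render_blockquotes_py (text : String) : String :=
  let lines := (PySem.Str.split? text "\n").getD []
  let st := lines.foldl pvStepA ([], false, [])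
  let res := if st.2.1 then st.1 ++ [pvBlockquote st.2.2] else st.1
  PySem.Str.join "\n" res

-- ===== PORT B =====
-- B's while-loop: collect each maximal run of '>'-lines (takeWhile/dropWhile), render as one block
def pvAltGo : List String → List String
  | [] => []
  | l :: ls =>
    if pvIsQuote l then
      -- the run starts at l, so (l::ls).dropWhile = ls.dropWhile here
      pvBlockquote (((l :: ls).takeWhile pvIsQuote).map pvQuoteBody)
        :: pvAltGo (ls.dropWhile pvIsQuote)
    else l :: pvAltGo ls
termination_by ls => ls.length
decreasing_by
  all_goals
    (have := List.length_dropWhile_le pvIsQuote ls;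
     simp only [List.length_cons]; omega)

def render_blockquotes_py_alt (text : String) : String :=
  PySem.Str.join "\n" (pvAltGo ((PySem.Str.split? text "\n").getD []))

-- ===== PRECONDITION & SPEC =====
def Spec_render_blockquotes_py (text : String) (out : String) : Prop := out = render_blockquotes_py_alt text
instance (text : String) (out : String) : Decidable (Spec_render_blockquotes_py text out) := by unfold Spec_render_blockquotes_py; infer_instance

-- ===== CLAIM (what is proved, stated in full; the proofs are below) =====
def Claim_equal_render_blockquotes_py : Prop := ∀ (text : String), Dom_render_blockquotes_py text → Spec_render_blockquotes_py text (render_blockquotes_py text)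

-- ===== LEMMAS AND PROOFS =====

-- proof-only: B's result list, for a run already begun with accumulated bodies q
def pvAltGoQ (q : List String) : List String → List String
  | [] => [pvBlockquote q]
  | l :: ls => if pvIsQuote l then pvAltGoQ (q ++ [pvQuoteBody l]) ls
               else pvBlockquote q :: pvAltGo (l :: ls)

theorem pvAltGoQ_spec (ls : List String) : ∀ q : List String,
    pvAltGoQ q ls =
      pvBlockquote (q ++ (ls.takeWhile pvIsQuote).map pvQuoteBody)
        :: pvAltGo (ls.dropWhile pvIsQuote) := by
  induction ls with
  | nil => intro q; simp [pvAltGoQ, pvAltGo]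
  | cons l ls ih =>
    intro q
    by_cases h : pvIsQuote l = true
    · simp [pvAltGoQ, h, ih]
    · simp [pvAltGoQ, h]

theorem pvAltGo_cons_quote (l : String) (ls : List String) (h : pvIsQuote l = true) :
    pvAltGo (l :: ls) = pvAltGoQ [pvQuoteBody l] ls := by
  rw [pvAltGo, if_pos h, pvAltGoQ_spec]
  simp [h]

theorem pvFold_spec (ls : List String) : ∀ (res : List String) (b : Bool) (q : List String),
    (if (ls.foldl pvStepA (res, b, q)).2.1 then
        (ls.foldl pvStepA (res, b, q)).1 ++ [pvBlockquote (ls.foldl pvStepA (res, b, q)).2.2]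
      else (ls.foldl pvStepA (res, b, q)).1)
      = res ++ (if b then pvAltGoQ q ls else pvAltGo ls) := by
  induction ls with
  | nil =>
    intro res b q
    cases b <;> simp [pvAltGoQ, pvAltGo]
  | cons l ls ih =>
    intro res b q
    by_cases h : pvIsQuote l = true
    · have hs : pvStepA (res, b, q) l =
          (res, true, (if b then q else []) ++ [pvQuoteBody l]) := by
        simp [pvStepA, h]
      rw [List.foldl_cons, hs, ih]
      cases b
      · simp [pvAltGo_cons_quote l ls h]
      · simp [pvAltGoQ, h]
    · cases b
      · have hs : pvStepA (res, false, q) l = (res ++ [l], false, q) := by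
          simp [pvStepA, h]
        rw [List.foldl_cons, hs, ih]
        simp [pvAltGo, h]
      · have hs : pvStepA (res, true, q) l =
            (res ++ [pvBlockquote q, l], false, q) := by
          simp [pvStepA, h]
        rw [List.foldl_cons, hs, ih]
        simp [pvAltGoQ, pvAltGo, h]

-- ===== VERDICT (by name: the statement is the Claim_ definition above) =====
theorem render_blockquotes_py_spec : Claim_equal_render_blockquotes_py := by
  intro text _
  unfold Spec_render_blockquotes_py
  simp only [render_blockquotes_py, render_blockquotes_py_alt]
  rw [pvFold_spec]
  simp
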